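-- pv_equiv track=rewrite | github.com/TailGuy/telegraf-app | app/main.py | validate_mqtt_topic
-- ===== SOURCE A (Python) =====
-- MQTT_TOPIC_EXCLUSION_CHARS = [
--     "+",    # Single-level wildcard character - illegal in topic names
--     "#",    # Multi-level wildcard character - illegal in topic names
--     "*",    # SMF wildcard character - causes interoperability issues
--     ">",    # SMF wildcard character - causes interoperability issues
--     "$",    # When used at start of topic - reserved for server implementation
--     "!",    # When used at start of topic - causes interoperability issues in SMF (topic exclusions)
--     # " "     # Space character - avoid as best practice to prevent parsing issues
-- ]
--
-- def validate_mqtt_topic(topic_name: str) -> bool: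
--     """
--     Validates an MQTT topic name against character restrictions.
--     Returns True if valid, False otherwise.
--     """
--     # Check for reserved characters
--     if any(char in topic_name for char in MQTT_TOPIC_EXCLUSION_CHARS):
--         return False
--
--     # Check for leading $ (allowed only for system topics)
--     if topic_name.startswith("$") and not (
--         topic_name.startswith("$SYS/") or
--         topic_name.startswith("$share/") or
--         topic_name.startswith("$noexport/")
--     ):
--         return False
--
--     # Check length restriction (250 bytes max per Solace docs)
--     if len(topic_name.encode('utf-8')) > 250:
--         return False
--
--     # Check for level count restriction (128 levels max per Solace docs)
--     if len(topic_name.split('/')) > 128: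
--         return False
--
--     return True
-- ===== SOURCE B (Python) =====
-- MQTT_TOPIC_EXCLUSION_CHARS = [
--     "+", "#", "*", ">", "$", "!",
-- ]
--
-- def validate_mqtt_topic(topic_name: str) -> bool:
--     # One explicit pass: per-character forbidden check with early exit,
--     # running UTF-8 byte count and running topic-level count.
--     byte_count = 0
--     levels = 1
--     for ch in topic_name:
--         if ch in MQTT_TOPIC_EXCLUSION_CHARS:
--             return False
--         byte_count += len(ch.encode('utf-8'))
--         if ch == '/':
--             levels += 1
--     return byte_count <= 250 and levels <= 128
-- ===== Notes on version B (the rewrite author's own statement) =====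
-- stated objective: alternative
-- what changed: Replaces A's four separate full scans (six substring searches, startswith checks, utf-8 encode, split('/')) by a single explicit pass over the characters that rejects forbidden characters early while accumulating the UTF-8 byte count and the '/'-level count, compared against the limits once at the end; the dead leading-'$' branch disappears since '$' is already an exclusion character.
import Mathlib
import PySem

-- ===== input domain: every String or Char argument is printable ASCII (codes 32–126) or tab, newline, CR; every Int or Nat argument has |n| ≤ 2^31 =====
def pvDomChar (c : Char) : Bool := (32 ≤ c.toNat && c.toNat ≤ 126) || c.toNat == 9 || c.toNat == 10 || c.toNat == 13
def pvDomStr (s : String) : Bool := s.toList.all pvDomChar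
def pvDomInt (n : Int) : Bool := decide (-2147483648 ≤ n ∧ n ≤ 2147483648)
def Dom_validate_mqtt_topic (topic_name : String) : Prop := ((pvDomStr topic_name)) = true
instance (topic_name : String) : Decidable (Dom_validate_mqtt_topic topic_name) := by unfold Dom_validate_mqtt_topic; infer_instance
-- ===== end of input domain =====

-- B replaces A's several full scans (substring searches, utf-8 encode, split) by one
-- explicit per-character pass with early exit and running byte/level counters (alternative decomposition).


-- ===== PORT A =====
-- len(topic_name.encode('utf-8')) : exact — the UTF-8 byte length is the sum of per-codepoint sizes
def pyUtf8Len (s : String) : Nat := (s.toList.map Char.utf8Size).sum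

def validate_mqtt_topic (topic_name : String) : Bool :=
  -- if any(char in topic_name for char in MQTT_TOPIC_EXCLUSION_CHARS): return False
  if ["+", "#", "*", ">", "$", "!"].any (fun ch => PySem.Str.isIn ch topic_name) then
    false
  -- leading-$ branch (dead in practice since '$' is an exclusion char, kept verbatim)
  else if PySem.Str.startswith topic_name "$" &&
      !(PySem.Str.startswith topic_name "$SYS/" ||
        PySem.Str.startswith topic_name "$share/" ||
        PySem.Str.startswith topic_name "$noexport/") then
    false
  else if pyUtf8Len topic_name > 250 then
    false
  -- split('/') with a nonempty separator never raises: split? is always `some` here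
  else if ((PySem.Str.split? topic_name "/").getD []).length > 128 then
    false
  else true

-- ===== PORT B =====
def bExcl : List Char := ['+', '#', '*', '>', '$', '!']

def bLoop : List Char → Nat → Nat → Bool
  | [], bytes, levels => decide (bytes ≤ 250) && decide (levels ≤ 128)
  | c :: rest, bytes, levels =>
    if c ∈ bExcl then false
    else bLoop rest (bytes + c.utf8Size) (if c = '/' then levels + 1 else levels)

def validate_mqtt_topic_alt (topic_name : String) : Bool :=
  bLoop topic_name.toList 0 1

-- ===== PRECONDITION & SPEC =====
def Spec_validate_mqtt_topic (topic_name : String) (out : Bool) : Prop := out = validate_mqtt_topic_alt topic_name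
instance (topic_name : String) (out : Bool) : Decidable (Spec_validate_mqtt_topic topic_name out) := by unfold Spec_validate_mqtt_topic; infer_instance

-- ===== CLAIM (what is proved, stated in full; the proofs are below) =====
def Claim_equal_validate_mqtt_topic : Prop := ∀ (topic_name : String), Dom_validate_mqtt_topic topic_name → Spec_validate_mqtt_topic topic_name (validate_mqtt_topic topic_name)

-- ===== LEMMAS AND PROOFS =====

lemma bLoop_spec (l : List Char) (b lv : Nat) :
    bLoop l b lv =
      if l.any (fun c => c ∈ bExcl) then false
      else (decide (b + (l.map Char.utf8Size).sum ≤ 250) && decide (lv + l.count '/' ≤ 128)) := by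
  induction l generalizing b lv with
  | nil => simp [bLoop]
  | cons c rest ih =>
    simp only [bLoop, List.any_cons, List.map_cons, List.sum_cons, List.count_cons]
    by_cases hc : c ∈ bExcl
    · simp [hc]
    · simp only [hc, if_neg hc, decide_false, Bool.false_or, ih]
      by_cases hr : rest.any (fun c => c ∈ bExcl)
      · simp [hr]
      · simp only [hr, if_false]
        by_cases hs : c = '/'
        · simp [hs, Nat.add_assoc, Nat.add_comm, Nat.add_left_comm]
        · have hb : (c == '/') = false := by simpa using hs
          simp only [hb, if_neg hs, Nat.add_zero, Nat.add_assoc, Bool.false_eq_true, if_false]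
          rfl

lemma singleton_infix_iff_mem (c : Char) (l : List Char) : [c] <:+: l ↔ c ∈ l := by
  constructor
  · rintro ⟨s, t, rfl⟩; simp
  · intro h
    obtain ⟨s, t, rfl⟩ := List.append_of_mem h
    exact ⟨s, t, by simp⟩

lemma exclA_eq (s : String) :
    (["+", "#", "*", ">", "$", "!"].any (fun ch => PySem.Str.isIn ch s)) =
      s.toList.any (fun c => c ∈ bExcl) := by
  have e1 : ("+" : String).toList = ['+'] := by decide
  have e2 : ("#" : String).toList = ['#'] := by decide
  have e3 : ("*" : String).toList = ['*'] := by decide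
  have e4 : (">" : String).toList = ['>'] := by decide
  have e5 : ("$" : String).toList = ['$'] := by decide
  have e6 : ("!" : String).toList = ['!'] := by decide
  rw [Bool.eq_iff_iff]
  simp only [List.any_cons, List.any_nil, Bool.or_eq_true, Bool.or_false,
    PySem.Str.isIn_eq, e1, e2, e3, e4, e5, e6, PySem.Chars.isIn_iff_infix,
    singleton_infix_iff_mem, List.any_eq_true, decide_eq_true_iff]
  constructor
  · rintro (h | h | h | h | h | h) <;>
      [exact ⟨'+', h, by decide⟩; exact ⟨'#', h, by decide⟩; exact ⟨'*', h, by decide⟩;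
       exact ⟨'>', h, by decide⟩; exact ⟨'$', h, by decide⟩; exact ⟨'!', h, by decide⟩]
  · rintro ⟨c, hc, hm⟩
    fin_cases hm <;> tauto

lemma splitOn_go_length (l : List Char) : ∀ (fuel : Nat) (cur : List Char) (acc : List (List Char)),
    l.length < fuel →
    (PySem.Chars.splitOn.go ['/'] fuel l cur acc).length = acc.length + l.count '/' + 1 := by
  induction l with
  | nil =>
    intro fuel cur acc h
    match fuel, h with
    | fuel + 1, _ => simp [PySem.Chars.splitOn.go]
  | cons c rest ih =>
    intro fuel cur acc h
    match fuel, h with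
    | fuel + 1, h =>
      simp only [PySem.Chars.splitOn.go]
      by_cases hc : c = '/'
      · subst hc
        rw [if_pos (by simp [List.isPrefixOf])]
        simp only [List.length_cons, List.length_nil, List.drop_succ_cons, List.drop_zero]
        rw [ih fuel _ _ (by simpa using h)]
        simp [List.count_cons]
        omega
      · rw [if_neg (by simp [List.isPrefixOf]; exact fun h' => hc h'.symm)]
        rw [ih fuel _ _ (by simpa using h)]
        simp [List.count_cons, hc]

lemma split_len (s : String) :
    ((PySem.Str.split? s "/").getD []).length = s.toList.count '/' + 1 := by
  have : PySem.Chars.split? s.toList ['/'] =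
      some (PySem.Chars.splitOn s.toList ['/']) := by
    simp [PySem.Chars.split?]
  simp only [PySem.Str.split?]
  have h2 : "/".toList = ['/'] := by decide
  rw [h2, this]
  have hgo := splitOn_go_length s.toList (s.toList.length + 1) [] [] (by omega)
  simp only [Option.getD_some, List.length_map, PySem.Chars.splitOn]
  simpa using hgo

lemma startswith_dollar_mem (s : String) (h : PySem.Str.startswith s "$" = true) :
    '$' ∈ s.toList := by
  rw [PySem.Str.startswith_eq, PySem.Chars.startswith_iff] at h
  have : "$".toList = ['$'] := by decide
  rw [this] at h
  exact (singleton_infix_iff_mem _ _).1 h.isInfix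

-- ===== VERDICT (by name: the statement is the Claim_ definition above) =====
theorem validate_mqtt_topic_spec : Claim_equal_validate_mqtt_topic := by
  intro s _
  unfold Spec_validate_mqtt_topic validate_mqtt_topic validate_mqtt_topic_alt
  rw [bLoop_spec, exclA_eq]
  cases hx : (s.toList.any fun c => decide (c ∈ bExcl)) with
  | true => simp [hx]
  | false =>
    have hd : PySem.Str.startswith s "$" = false := by
      cases hb : PySem.Str.startswith s "$" with
      | false => rfl
      | true =>
        have hm : ('$' : Char) ∈ s.toList := startswith_dollar_mem s hb
        have : (s.toList.any fun c => decide (c ∈ bExcl)) = true :=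
          List.any_eq_true.2 ⟨'$', hm, by decide⟩
        rw [hx] at this
        cases this
    simp only [hx, Bool.false_eq_true, if_false, hd, Bool.false_and, split_len, pyUtf8Len]
    split_ifs with h1 h2 <;> simp <;> omega
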